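-- pv_equiv track=rewrite | github.com/scieloorg/PC-Programs | src/scielo/bin/xml/modules/article_utils.py | remove_xref
-- ===== SOURCE A (Python) =====
-- def remove_xref(article_title):
--     text = article_title
--     if text is not None:
--         text = text.replace('<xref', '_BREAK_<xref')
--         text = text.replace('</xref>', '</xref>_BREAK_')
--         parts = text.split('_BREAK_')
--         new = []
--         for part in parts:
--             if '<xref' in part and '</xref>' in part:
--                 pass
--             else:
--                 new.append(part)
--
--         text = ''.join(new)
--         text = text.replace('<sup></sup>', '')
--         text = text.replace('<sup/>', '')
--         text = text.strip()
--     return text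
-- ===== SOURCE B (Python) =====
-- def remove_xref(article_title):
--     text = article_title
--     if text is not None:
--         # single left-to-right scan instead of sentinel insertion + split + filter + join
--         out = []
--         i = 0
--         n = len(text)
--         while i < n:
--             if text.startswith('<xref', i):
--                 i += 5
--                 seg = ''
--                 while i < n and not text.startswith('</xref>', i) and not text.startswith('<xref', i):
--                     seg += text[i]
--                     i += 1
--                 if i < n and text.startswith('</xref>', i):
--                     i += 7                      # closed tag: drop '<xref' + seg + '</xref>'
--                 else:
--                     out.append('<xref' + seg)   # unclosed (end or a second '<xref'): keep verbatim
--             else: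
--                 out.append(text[i])
--                 i += 1
--         text = ''.join(out)
--         text = text.replace('<sup></sup>', '')
--         text = text.replace('<sup/>', '')
--         text = text.strip()
--     return text
-- ===== Notes on version B (the rewrite author's own statement) =====
-- stated objective: alternative
-- what changed: A inserts '_BREAK_' sentinels via two replace passes, splits on the sentinel, filters parts containing both tags and re-joins; B is a single left-to-right scan that copies characters and drops each '<xref'..'</xref>' segment directly (no sentinel, no split/filter/join).
-- intended difference: On inputs in which the literal sentinel '_BREAK_' occurs, or '_BREAK' occurs immediately before a '<xref', A's sentinel-split machinery silently deletes or mis-groups those characters, while B treats them as ordinary text, which is the intended behaviour. — e.g. on remove_xref(some "_BREAK_"): A returns some "", B returns some "_BREAK_"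
import Mathlib
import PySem

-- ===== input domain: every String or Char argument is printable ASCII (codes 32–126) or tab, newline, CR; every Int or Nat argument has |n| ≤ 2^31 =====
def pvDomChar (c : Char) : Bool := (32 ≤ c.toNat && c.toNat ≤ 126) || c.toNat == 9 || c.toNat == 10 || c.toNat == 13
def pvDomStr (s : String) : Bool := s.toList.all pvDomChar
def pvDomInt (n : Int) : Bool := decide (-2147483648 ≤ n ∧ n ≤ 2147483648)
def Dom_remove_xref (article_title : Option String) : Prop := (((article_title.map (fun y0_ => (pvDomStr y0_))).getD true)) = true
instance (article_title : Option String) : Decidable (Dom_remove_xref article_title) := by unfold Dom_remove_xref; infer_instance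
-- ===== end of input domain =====

-- B replaces A's sentinel-insert/split/filter/join pipeline by a single left-to-right scan
-- that drops each '<xref'..'</xref>' segment directly (objective: alternative algorithm);
-- on inputs carrying the literal sentinel '_BREAK_' (or '_BREAK' right before '<xref'),
-- A silently deletes/mis-groups the sentinel text and B returns the intended value (see D_).


-- ===== PORT A =====
-- A works on Python str; the port runs on the code-point list (s.toList) and rebuilds the
-- String at the end — each step is the exact PySem counterpart of the Python string method.
-- 'for part in parts: if '<xref' in part and '</xref>' in part: pass else: new.append(part)'
-- is the foldl below; ''.join(new) is PySem.Chars.join [].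
def removeXrefCharsA (tl : List Char) : List Char :=
  let t1 := PySem.Chars.replace tl "<xref".toList "_BREAK_<xref".toList
  let t2 := PySem.Chars.replace t1 "</xref>".toList "</xref>_BREAK_".toList
  let parts := PySem.Chars.splitOn t2 "_BREAK_".toList
  let news := parts.foldl
    (fun acc part =>
      if PySem.Chars.isIn "<xref".toList part && PySem.Chars.isIn "</xref>".toList part then acc
      else acc ++ [part]) []
  let t3 := PySem.Chars.join [] news
  let t4 := PySem.Chars.replace t3 "<sup></sup>".toList "".toList
  let t5 := PySem.Chars.replace t4 "<sup/>".toList "".toList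
  PySem.Chars.strip t5

def remove_xref (article_title : Option String) : Option String :=
  match article_title with
  | none => none
  | some s => some (String.ofList (removeXrefCharsA s.toList))

-- ===== PORT B =====
-- Source B's outer while-loop over the remaining suffix is the structural recursion xrefCore;
-- its inner while-loop (which accumulates seg and stops at '</xref>', '<xref' or the end)
-- is xrefSeg.  'out.append(...)' becomes prepending to the recursive result; the step
-- 'i = j' followed by the next outer iteration at a '<xref' is inlined as the recursive
-- call xrefSeg (l.drop 5) [].
mutual
def xrefCore : List Char → List Char
  | [] => []
  | c :: t =>
    if "<xref".toList.isPrefixOf (c :: t) then xrefSeg ((c :: t).drop 5) []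
    else c :: xrefCore t
  termination_by l => l.length
  decreasing_by all_goals (simp [List.length_drop]; try omega)
def xrefSeg : List Char → List Char → List Char
  | [], seg => "<xref".toList ++ seg
  | c :: t, seg =>
    if "</xref>".toList.isPrefixOf (c :: t) then xrefCore ((c :: t).drop 7)
    else if "<xref".toList.isPrefixOf (c :: t) then
      ("<xref".toList ++ seg) ++ xrefSeg ((c :: t).drop 5) []
    else xrefSeg t (seg ++ [c])
  termination_by l _ => l.length
  decreasing_by all_goals (simp [List.length_drop]; try omega)
end

def removeXrefCharsB (tl : List Char) : List Char :=
  let t3 := xrefCore tl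
  let t4 := PySem.Chars.replace t3 "<sup></sup>".toList "".toList
  let t5 := PySem.Chars.replace t4 "<sup/>".toList "".toList
  PySem.Chars.strip t5

def remove_xref_alt (article_title : Option String) : Option String :=
  match article_title with
  | none => none
  | some s => some (String.ofList (removeXrefCharsB s.toList))

-- ===== PRECONDITION & SPEC =====
-- On inputs in which the literal sentinel '_BREAK_' occurs, or '_BREAK' occurs immediately
-- before a '<xref', A's split machinery silently deletes or mis-groups those characters (an
-- artefact of its sentinel implementation); B treats them as ordinary text, which is the
-- intended behaviour.  The witness below records both values at one such input.
def D_remove_xref (article_title : Option String) : Prop :=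
  (article_title.map
    (fun s => PySem.Str.isIn "_BREAK_" s || PySem.Str.isIn "_BREAK<xref" s)).getD false = true
instance (article_title : Option String) : Decidable (D_remove_xref article_title) := by
  unfold D_remove_xref; infer_instance

def Spec_remove_xref (article_title : Option String) (out : Option String) : Prop :=
  ¬ D_remove_xref article_title → out = remove_xref_alt article_title
instance (article_title : Option String) (out : Option String) : Decidable (Spec_remove_xref article_title out) := by
  unfold Spec_remove_xref; infer_instance

def pvDiffWitness_remove_xref : Option String := some "_BREAK_"
def pvDiffWitnessOut_remove_xref : (Option String) × (Option String) := (some "", some "_BREAK_")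

-- ===== CLAIM (what is proved, stated in full; the proofs are below) =====
def Claim_unchanged_remove_xref : Prop := ∀ (article_title : Option String), Dom_remove_xref article_title → Spec_remove_xref article_title (remove_xref article_title)
def Claim_changed_remove_xref : Prop := Dom_remove_xref (pvDiffWitness_remove_xref) ∧ D_remove_xref (pvDiffWitness_remove_xref) ∧ remove_xref (pvDiffWitness_remove_xref) = pvDiffWitnessOut_remove_xref.1 ∧ remove_xref_alt (pvDiffWitness_remove_xref) = pvDiffWitnessOut_remove_xref.2 ∧ pvDiffWitnessOut_remove_xref.1 ≠ pvDiffWitnessOut_remove_xref.2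

-- ===== LEMMAS AND PROOFS =====

-- Short names for the three patterns involved.
abbrev chXO : List Char := ['<','x','r','e','f']
abbrev chXC : List Char := ['<','/','x','r','e','f','>']
abbrev chBR : List Char := ['_','B','R','E','A','K','_']

-- Clean (fuel-free) recursions characterising PySem's fuel-based replace / splitOn.
def repS (old new : List Char) : List Char → List Char
  | [] => []
  | c :: t =>
    if old.isPrefixOf (c :: t) then new ++ repS old new (t.drop (old.length - 1))
    else c :: repS old new t
  termination_by l => l.length
  decreasing_by all_goals (simp [List.length_drop]; try omega)

def splS (sep : List Char) : List Char → List Char × List (List Char)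
  | [] => ([], [])
  | c :: t =>
    if sep.isPrefixOf (c :: t) then
      ([], (splS sep (t.drop (sep.length - 1))).1 :: (splS sep (t.drop (sep.length - 1))).2)
    else (c :: (splS sep t).1, (splS sep t).2)
  termination_by l => l.length
  decreasing_by all_goals (simp [List.length_drop]; try omega)

-- step lemmas for the clean recursions
lemma repS_pos (old new : List Char) (l : List Char) (h : old <+: l) (hne : l ≠ []) (ho : old ≠ []) :
    repS old new l = new ++ repS old new (l.drop old.length) := by
  cases l with
  | nil => exact absurd rfl hne
  | cons c t =>
    rw [repS, if_pos (List.isPrefixOf_iff_prefix.mpr h)]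
    congr 1
    cases old with
    | nil => exact absurd rfl ho
    | cons o os => simp

lemma repS_neg (old new : List Char) (c : Char) (t : List Char) (h : ¬ old <+: (c :: t)) :
    repS old new (c :: t) = c :: repS old new t := by
  rw [repS, if_neg (fun hb => h (List.isPrefixOf_iff_prefix.mp hb))]

lemma splS_pos (sep : List Char) (l : List Char) (h : sep <+: l) (hne : l ≠ []) (ho : sep ≠ []) :
    splS sep l = ([], (splS sep (l.drop sep.length)).1 :: (splS sep (l.drop sep.length)).2) := by
  cases l with
  | nil => exact absurd rfl hne
  | cons c t =>
    rw [splS, if_pos (List.isPrefixOf_iff_prefix.mpr h)]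
    have : List.drop sep.length (c :: t) = t.drop (sep.length - 1) := by
      cases sep with
      | nil => exact absurd rfl ho
      | cons o os => simp
    rw [this]

lemma splS_neg (sep : List Char) (c : Char) (t : List Char) (h : ¬ sep <+: (c :: t)) :
    splS sep (c :: t) = (c :: (splS sep t).1, (splS sep t).2) := by
  rw [splS, if_neg (fun hb => h (List.isPrefixOf_iff_prefix.mp hb))]

lemma replace_go_spec (old new : List Char) (hold : old ≠ []) :
    ∀ fuel l acc, l.length ≤ fuel →
      PySem.Chars.replace.go old new fuel l acc = acc.reverse ++ repS old new l := by
  intro fuel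
  induction fuel with
  | zero =>
    intro l acc hl
    have : l = [] := by cases l <;> simp_all
    subst this
    simp [PySem.Chars.replace.go, repS]
  | succ f ih =>
    intro l acc hl
    cases l with
    | nil => simp [PySem.Chars.replace.go, repS]
    | cons c t =>
      rw [PySem.Chars.replace.go]
      by_cases hp : old.isPrefixOf (c :: t)
      · have h1 : 1 ≤ old.length := by cases old with | nil => exact absurd rfl hold | cons o os => simp
        rw [if_pos hp, ih _ _ (by simp at hl ⊢; omega)]
        rw [repS_pos old new _ (List.isPrefixOf_iff_prefix.mp hp) (by simp) hold]
        simp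
      · rw [if_neg hp, ih _ _ (by simp at hl ⊢; omega)]
        rw [repS_neg old new c t (fun hb => hp (List.isPrefixOf_iff_prefix.mpr hb))]
        simp

lemma replace_eq (old new s : List Char) (h : old ≠ []) :
    PySem.Chars.replace s old new = repS old new s := by
  rw [PySem.Chars.replace, if_neg (by simp [List.isEmpty_iff, h])]
  simpa using replace_go_spec old new h s.length s [] le_rfl

lemma splitOn_go_spec (sep : List Char) (hsep : sep ≠ []) :
    ∀ fuel l cur acc, l.length < fuel →
      PySem.Chars.splitOn.go sep fuel l cur acc =
        acc.reverse ++ ((cur.reverse ++ (splS sep l).1) :: (splS sep l).2) := by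
  intro fuel
  induction fuel with
  | zero => intro l cur acc hl; omega
  | succ f ih =>
    intro l cur acc hl
    cases l with
    | nil => simp [PySem.Chars.splitOn.go, splS]
    | cons c t =>
      rw [PySem.Chars.splitOn.go]
      have h1 : 1 ≤ sep.length := by cases sep with | nil => exact absurd rfl hsep | cons o os => simp
      by_cases hp : sep.isPrefixOf (c :: t)
      · rw [if_pos hp]
        by_cases hf : f = 0
        · exfalso; simp at hl; omega
        · rw [ih _ _ _ (by simp at hl ⊢; omega)]
          rw [splS_pos sep _ (List.isPrefixOf_iff_prefix.mp hp) (by simp) hsep]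
          have : List.drop sep.length (c :: t) = t.drop (sep.length - 1) := by
            cases sep with
            | nil => exact absurd rfl hsep
            | cons o os => simp
          simp [this]
      · rw [if_neg hp, ih _ _ _ (by simp at hl ⊢; omega)]
        rw [splS_neg sep c t (fun hb => hp (List.isPrefixOf_iff_prefix.mpr hb))]
        simp

lemma splitOn_eq (sep s : List Char) (h : sep ≠ []) :
    PySem.Chars.splitOn s sep = (splS sep s).1 :: (splS sep s).2 := by
  rw [PySem.Chars.splitOn]
  simpa using splitOn_go_spec sep h (s.length + 1) s [] [] (by omega)

lemma join_nil_flatten : ∀ parts : List (List Char), PySem.Chars.join [] parts = parts.flatten := by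
  intro parts
  induction parts with
  | nil => rfl
  | cons p ps ih =>
    cases ps with
    | nil => simp [PySem.Chars.join, List.intercalate]
    | cons q qs =>
      rw [PySem.Chars.join] at ih ⊢
      simp only [List.intercalate, List.intersperse] at ih ⊢
      simp_all [List.flatten]

-- walking over a region in which no occurrence of the pattern starts
lemma repS_walk (old new : List Char) :
    ∀ u v, (∀ i, i < u.length → ¬ old <+: (u ++ v).drop i) →
      repS old new (u ++ v) = u ++ repS old new v := by
  intro u
  induction u with
  | nil => intro v _; simp
  | cons c u' ih =>
    intro v h
    have h0 : ¬ old <+: (c :: (u' ++ v)) := by simpa using h 0 (by simp)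
    rw [List.cons_append, repS_neg old new _ _ h0, ih v (fun i hi => by simpa using h (i+1) (by simp; omega))]
    simp

lemma splS_walk (sep : List Char) :
    ∀ u v, (∀ i, i < u.length → ¬ sep <+: (u ++ v).drop i) →
      splS sep (u ++ v) = (u ++ (splS sep v).1, (splS sep v).2) := by
  intro u
  induction u with
  | nil => intro v _; simp
  | cons c u' ih =>
    intro v h
    have h0 : ¬ sep <+: (c :: (u' ++ v)) := by simpa using h 0 (by simp)
    rw [List.cons_append, splS_neg sep _ _ h0, ih v (fun i hi => by simpa using h (i+1) (by simp; omega))]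
    simp

-- unfolding lemmas for the B port
lemma toList_xo : "<xref".toList = chXO := by decide
lemma toList_xc : "</xref>".toList = chXC := by decide

lemma core_nil : xrefCore [] = [] := by simp [xrefCore]

lemma core_xo (r : List Char) : xrefCore (chXO ++ r) = xrefSeg r [] := by
  rw [show chXO ++ r = '<' :: ('x'::'r'::'e'::'f'::r) from rfl, xrefCore]
  rw [if_pos (by rw [toList_xo]; exact List.isPrefixOf_iff_prefix.mpr (by simp [List.cons_prefix_cons]))]
  simp

lemma core_char (c : Char) (t : List Char) (h : ¬ chXO <+: (c :: t)) :
    xrefCore (c :: t) = c :: xrefCore t := by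
  rw [xrefCore, if_neg (by rw [toList_xo]; exact fun hb => h (List.isPrefixOf_iff_prefix.mp hb))]

lemma seg_nil (seg : List Char) : xrefSeg [] seg = chXO ++ seg := by simp [xrefSeg, toList_xo]

lemma seg_xc (r seg : List Char) : xrefSeg (chXC ++ r) seg = xrefCore r := by
  rw [show chXC ++ r = '<' :: ('/'::'x'::'r'::'e'::'f'::'>'::r) from rfl, xrefSeg]
  rw [if_pos (by rw [toList_xc]; exact List.isPrefixOf_iff_prefix.mpr (by simp [List.cons_prefix_cons]))]
  simp

lemma seg_xo (r seg : List Char) : xrefSeg (chXO ++ r) seg = (chXO ++ seg) ++ xrefSeg r [] := by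
  rw [show chXO ++ r = '<' :: ('x'::'r'::'e'::'f'::r) from rfl, xrefSeg]
  rw [if_neg (by rw [toList_xc]; intro hb; have := List.isPrefixOf_iff_prefix.mp hb; simp [List.cons_prefix_cons] at this)]
  rw [if_pos (by rw [toList_xo]; exact List.isPrefixOf_iff_prefix.mpr (by simp [List.cons_prefix_cons]))]
  simp [toList_xo]

lemma seg_char (c : Char) (t seg : List Char) (h1 : ¬ chXC <+: (c :: t)) (h2 : ¬ chXO <+: (c :: t)) :
    xrefSeg (c :: t) seg = xrefSeg t (seg ++ [c]) := by
  rw [xrefSeg, if_neg (by rw [toList_xc]; exact fun hb => h1 (List.isPrefixOf_iff_prefix.mp hb)),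
      if_neg (by rw [toList_xo]; exact fun hb => h2 (List.isPrefixOf_iff_prefix.mp hb))]

lemma core_walk :
    ∀ u v, (∀ i, i < u.length → ¬ chXO <+: (u ++ v).drop i) →
      xrefCore (u ++ v) = u ++ xrefCore v := by
  intro u
  induction u with
  | nil => intro v _; simp
  | cons c u' ih =>
    intro v h
    have h0 : ¬ chXO <+: (c :: (u' ++ v)) := by simpa using h 0 (by simp)
    rw [List.cons_append, core_char _ _ h0, ih v (fun i hi => by simpa using h (i+1) (by simp; omega))]
    simp

-- no occurrence of one concrete pattern starts inside another
lemma noXO_in_XC (r : List Char) (i : Nat) (h : i < 7) : ¬ chXO <+: (chXC ++ r).drop i := by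
  interval_cases i <;> simp [List.cons_prefix_cons]
lemma noXC_in_XO (r : List Char) (i : Nat) (h : i < 5) : ¬ chXC <+: (chXO ++ r).drop i := by
  interval_cases i <;> simp [List.cons_prefix_cons]
lemma noXC_in_BRXO (r : List Char) (i : Nat) (h : i < 12) : ¬ chXC <+: ((chBR ++ chXO) ++ r).drop i := by
  interval_cases i <;> simp [List.cons_prefix_cons]
lemma noBR_in_XO (r : List Char) (i : Nat) (h : i < 5) : ¬ chBR <+: (chXO ++ r).drop i := by
  interval_cases i <;> simp [List.cons_prefix_cons]
lemma noBR_in_XC (r : List Char) (i : Nat) (h : i < 7) : ¬ chBR <+: (chXC ++ r).drop i := by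
  interval_cases i <;> simp [List.cons_prefix_cons]

-- the composed replace pipeline of A
def pipe (l : List Char) : List Char := repS chXC (chXC ++ chBR) (repS chXO (chBR ++ chXO) l)

lemma t1_aux : ∀ (x w : List Char), '_' ∉ w → '<' ∉ w →
    (w <+: repS chXO (chBR ++ chXO) x ↔ w <+: x) := by
  have key : ∀ n (x : List Char), x.length ≤ n → ∀ (w : List Char), '_' ∉ w → '<' ∉ w →
      (w <+: repS chXO (chBR ++ chXO) x ↔ w <+: x) := by
    intro n
    induction n with
    | zero =>
      intro x hx w _ _
      have : x = [] := by cases x <;> simp_all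
      subst this; rw [show repS chXO (chBR ++ chXO) [] = [] from by simp [repS]]
    | succ m ih =>
      intro x hx w hu hl
      cases w with
      | nil => simp
      | cons a w' =>
        by_cases hxo : chXO <+: x
        · obtain ⟨r, rfl⟩ := hxo
          rw [repS_pos _ _ _ (List.prefix_append _ _) (by simp) (by simp)]
          constructor
          · intro hpre
            rw [show ((chBR ++ chXO) ++ repS chXO (chBR ++ chXO) ((chXO ++ r).drop chXO.length))
                  = '_' :: (['B','R','E','A','K','_'] ++ chXO ++ repS chXO (chBR ++ chXO) ((chXO ++ r).drop chXO.length)) from rfl,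
                List.cons_prefix_cons] at hpre
            exact absurd (hpre.1 ▸ List.mem_cons_self) hu
          · intro hpre
            rw [show chXO ++ r = '<' :: ('x'::'r'::'e'::'f'::r) from rfl, List.cons_prefix_cons] at hpre
            exact absurd (hpre.1 ▸ List.mem_cons_self) hl
        · cases x with
          | nil => rw [show repS chXO (chBR ++ chXO) [] = [] from by simp [repS]]
          | cons c t =>
            rw [repS_neg _ _ _ _ hxo, List.cons_prefix_cons, List.cons_prefix_cons]
            have := ih t (by simp at hx; omega) w' (fun hm => hu (List.mem_cons_of_mem _ hm)) (fun hm => hl (List.mem_cons_of_mem _ hm))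
            rw [this]
  intro x w hu hl
  exact key x.length x le_rfl w hu hl

-- XC occurrences survive the first replace pass backwards
lemma t1 (x : List Char) (h : chXC <+: repS chXO (chBR ++ chXO) x) : chXC <+: x := by
  by_cases hxo : chXO <+: x
  · obtain ⟨r, rfl⟩ := hxo
    rw [repS_pos _ _ _ (List.prefix_append _ _) (by simp) (by simp)] at h
    rw [show ((chBR ++ chXO) ++ repS chXO (chBR ++ chXO) ((chXO ++ r).drop chXO.length))
          = '_' :: (['B','R','E','A','K','_'] ++ chXO ++ repS chXO (chBR ++ chXO) ((chXO ++ r).drop chXO.length)) from rfl,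
        List.cons_prefix_cons] at h
    simp at h
  · cases x with
    | nil => rw [show repS chXO (chBR ++ chXO) [] = [] from by simp [repS]] at h; simp at h
    | cons c t =>
      rw [repS_neg _ _ _ _ hxo, List.cons_prefix_cons] at h
      rw [show chXC = '<' :: ['/','x','r','e','f','>'] from rfl, List.cons_prefix_cons]
      refine ⟨h.1, ?_⟩
      have := t1_aux t ['/','x','r','e','f','>'] (by decide) (by decide)
      exact this.mp h.2

lemma pipe_nil : pipe [] = [] := by
  simp [pipe, repS]
lemma pipe_xo (r : List Char) : pipe (chXO ++ r) = chBR ++ chXO ++ pipe r := by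
  rw [pipe, repS_pos _ _ _ (List.prefix_append _ _) (by simp) (by simp),
      show (chXO ++ r).drop chXO.length = r from by simp,
      show (chBR ++ chXO) ++ repS chXO (chBR ++ chXO) r = (chBR ++ chXO) ++ repS chXO (chBR ++ chXO) r ++ [] from by simp]
  rw [show ((chBR ++ chXO) ++ repS chXO (chBR ++ chXO) r ++ []) = ((chBR ++ chXO) ++ (repS chXO (chBR ++ chXO) r ++ [])) from by simp]
  rw [repS_walk _ _ _ _ (fun i hi => by
        simp only [List.length_append] at hi
        exact noXC_in_BRXO _ i (by simpa using hi))]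
  simp [pipe]
lemma pipe_xc (r : List Char) : pipe (chXC ++ r) = chXC ++ chBR ++ pipe r := by
  rw [pipe, repS_walk _ _ chXC _ (fun i hi => noXO_in_XC _ i (by simpa using hi)),
      repS_pos _ _ _ (List.prefix_append _ _) (by simp) (by simp),
      show (chXC ++ repS chXO (chBR ++ chXO) r).drop chXC.length = repS chXO (chBR ++ chXO) r from by simp]
  simp [pipe]
lemma pipe_char (c : Char) (t : List Char) (h1 : ¬ chXO <+: (c :: t)) (h2 : ¬ chXC <+: (c :: t)) :
    pipe (c :: t) = c :: pipe t := by
  rw [pipe, repS_neg _ _ _ _ h1, repS_neg _ _ _ _ (fun hpre => by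
      rw [← repS_neg chXO (chBR ++ chXO) _ _ h1] at hpre
      exact h2 (t1 _ hpre))]
  rfl

-- where can a suffix of '_BREAK_' be a prefix of the pipelined string?
lemma brTransfer : ∀ (d p : List Char), p <:+ chBR → p ≠ [] → p <+: pipe d →
    p <+: d ∨ (p = chBR ∧ chXO <+: d) ∨ (p.dropLast <+: d ∧ chXO <+: d.drop (p.length - 1)) := by
  have key : ∀ n (d : List Char), d.length ≤ n → ∀ p, p <:+ chBR → p ≠ [] → p <+: pipe d →
      p <+: d ∨ (p = chBR ∧ chXO <+: d) ∨ (p.dropLast <+: d ∧ chXO <+: d.drop (p.length - 1)) := by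
    intro n
    induction n with
    | zero =>
      intro d hd p _ hne hp
      have : d = [] := by cases d <;> simp_all
      subst this
      rw [pipe_nil] at hp
      exact absurd (List.prefix_nil.mp hp) hne
    | succ m ih =>
      intro d hd p hsuf hne hp
      have hpeq : p = chBR.drop (chBR.length - p.length) := List.suffix_iff_eq_drop.mp hsuf
      have hplen : p.length ≤ 7 := by simpa using hsuf.length_le
      have hplen1 : 1 ≤ p.length := by cases p with | nil => exact absurd rfl hne | cons a q => simp
      by_cases hxo : chXO <+: d
      · obtain ⟨r, rfl⟩ := hxo
        rw [pipe_xo, show chBR ++ chXO ++ pipe r = chBR ++ (chXO ++ pipe r) from by simp] at hp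
        have hptake : p = chBR.take p.length := by
          have := List.prefix_iff_eq_take.mp hp
          rwa [List.take_append_of_le_length (by simpa using hplen)] at this
        set q := p.length with hq
        interval_cases q
        · -- p = ['_'] : the quirky absorption case
          right; right
          constructor
          · rw [hpeq]; simp
          · simp
        · exfalso; rw [hpeq] at hptake; simp at hptake
        · exfalso; rw [hpeq] at hptake; simp at hptake
        · exfalso; rw [hpeq] at hptake; simp at hptake
        · exfalso; rw [hpeq] at hptake; simp at hptake
        · exfalso; rw [hpeq] at hptake; simp at hptake
        · right; left
          exact ⟨by rw [hpeq]; simp, List.prefix_append _ _⟩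
      · by_cases hxc : chXC <+: d
        · obtain ⟨r, rfl⟩ := hxc
          exfalso
          rw [pipe_xc, show chXC ++ chBR ++ pipe r = chXC ++ (chBR ++ pipe r) from by simp] at hp
          have hptake : p = chXC.take p.length := by
            have := List.prefix_iff_eq_take.mp hp
            rwa [List.take_append_of_le_length (by simpa using hplen)] at this
          set q := p.length with hq
          interval_cases q <;> (rw [hpeq] at hptake; simp at hptake)
        · cases d with
          | nil =>
            rw [pipe_nil] at hp
            exact absurd (List.prefix_nil.mp hp) hne
          | cons c t =>
            rw [pipe_char c t hxo hxc] at hp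
            cases p with
            | nil => exact absurd rfl hne
            | cons a p' =>
              rw [List.cons_prefix_cons] at hp
              obtain ⟨rfl, hp'⟩ := hp
              rcases eq_or_ne p' [] with hp'nil | hp'ne
              · left
                subst hp'nil
                rw [List.cons_prefix_cons]
                exact ⟨rfl, by simp⟩
              · have hp'suf : p' <:+ chBR := by
                  have : p' = (a :: p').drop 1 := rfl
                  rw [hpeq] at this
                  rw [this, List.drop_drop]
                  exact List.drop_suffix _ _
                rcases ih t (by simp at hd; omega) p' hp'suf hp'ne hp' with h1 | h2 | h3
                · left
                  rw [List.cons_prefix_cons]; exact ⟨rfl, h1⟩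
                · exfalso
                  have : p'.length ≤ 6 := by
                    have := hplen; simp at this ⊢; omega
                  rw [h2.1] at this; simp at this
                · right; right
                  obtain ⟨h31, h32⟩ := h3
                  constructor
                  · rw [List.dropLast_cons_of_ne_nil hp'ne, List.cons_prefix_cons]
                    exact ⟨rfl, h31⟩
                  · have hlen : p'.length - 1 + 1 = p'.length := by
                      cases p' with | nil => exact absurd rfl hp'ne | cons b q => simp
                    simp only [List.length_cons, Nat.add_sub_cancel]
                    rw [← hlen, List.drop_succ_cons]
                    exact h32
  intro d p h1 h2 h3
  exact key d.length d le_rfl p h1 h2 h3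

-- a pattern that starts nowhere in the enclosing string is not contained in a prefix part
lemma isIn_false_of_no_start (q part ext : List Char) (hq : q ≠ []) (hpe : part <+: ext)
    (h : ∀ i, i < part.length → ¬ q <+: ext.drop i) : PySem.Chars.isIn q part = false := by
  rw [PySem.Chars.isIn_eq_false_iff]
  intro hinf
  have : ∃ j, q <+: part.drop j := by
    obtain ⟨s, t, rfl⟩ := hinf
    exact ⟨s.length, by simp⟩
  obtain ⟨j, hj⟩ := this
  have hjlt : j < part.length := by
    by_contra hge
    rw [List.drop_eq_nil_of_le (by omega)] at hj
    exact hq (List.prefix_nil.mp hj)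
  have hmono : part.drop j <+: ext.drop j := by
    obtain ⟨rest, rfl⟩ := hpe
    rw [List.drop_append_of_le_length (by omega)]
    exact List.prefix_append _ _
  exact h j hjlt (hj.trans hmono)

def keepPart (p : List Char) : Bool := !(PySem.Chars.isIn chXO p && PySem.Chars.isIn chXC p)

def partsOf (l : List Char) : List Char × List (List Char) := splS chBR (pipe l)

def goodStr (d : List Char) : Prop := ¬ chBR <:+: d ∧ ¬ (['_','B','R','E','A','K'] ++ chXO) <:+: d

lemma isIn_of_infix (q l : List Char) (h : q <:+: l) : PySem.Chars.isIn q l = true :=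
  (PySem.Chars.isIn_iff_infix q l).mpr h

lemma drop_between (acc x : List Char) (i : Nat) (h : acc.length ≤ i) :
    (acc ++ x).drop i = x.drop (i - acc.length) := by
  simp [List.drop_append, List.drop_eq_nil_of_le h]

lemma partsOf_nil : partsOf [] = ([], []) := by
  simp [partsOf, pipe_nil, splS]

lemma partsOf_xo (r : List Char) :
    partsOf (chXO ++ r) = ([], (chXO ++ (partsOf r).1) :: (partsOf r).2) := by
  rw [partsOf, pipe_xo, show chBR ++ chXO ++ pipe r = chBR ++ (chXO ++ pipe r) from by simp]
  rw [splS_pos _ _ (List.prefix_append _ _) (by simp) (by simp)]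
  rw [show (chBR ++ (chXO ++ pipe r)).drop chBR.length = chXO ++ pipe r from by simp]
  rw [splS_walk _ chXO _ (fun i hi => noBR_in_XO _ i (by simpa using hi))]
  rfl

lemma partsOf_xc (r : List Char) :
    partsOf (chXC ++ r) = (chXC, (partsOf r).1 :: (partsOf r).2) := by
  rw [partsOf, pipe_xc, show chXC ++ chBR ++ pipe r = chXC ++ (chBR ++ pipe r) from by simp]
  rw [splS_walk _ chXC _ (fun i hi => noBR_in_XC _ i (by simpa using hi))]
  rw [splS_pos _ _ (List.prefix_append _ _) (by simp) (by simp)]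
  rw [show (chBR ++ pipe r).drop chBR.length = pipe r from by simp]
  simp [partsOf]

lemma partsOf_char (c : Char) (t : List Char) (h1 : ¬ chXO <+: (c :: t)) (h2 : ¬ chXC <+: (c :: t))
    (hG : goodStr (c :: t)) : partsOf (c :: t) = (c :: (partsOf t).1, (partsOf t).2) := by
  have hbr : ¬ chBR <+: (c :: pipe t) := by
    intro hb
    rw [← pipe_char c t h1 h2] at hb
    rcases brTransfer (c :: t) chBR List.suffix_rfl (by simp) hb with hA | hB | hC
    · exact hG.1 hA.isInfix
    · exact h1 hB.2
    · obtain ⟨h31, h32⟩ := hC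
      apply hG.2
      have htake : chBR.dropLast = (c :: t).take 6 := by
        have := List.prefix_iff_eq_take.mp h31
        simpa using this
      obtain ⟨rest, hrest⟩ := h32
      have : (c :: t) = (['_','B','R','E','A','K'] ++ chXO) ++ rest := by
        conv_lhs => rw [← List.take_append_drop 6 (c :: t)]
        rw [← htake, show chBR.dropLast = ['_','B','R','E','A','K'] from by simp]
        rw [show (c :: t).drop 6 = (c :: t).drop (chBR.length - 1) from by simp]
        rw [← hrest]
        simp
      exact ⟨[], rest, by simpa using this.symm⟩
  rw [partsOf, pipe_char c t h1 h2, splS_neg _ _ _ hbr]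
  rfl

lemma goodStr_drop (d : List Char) (k : Nat) (h : goodStr d) : goodStr (d.drop k) := by
  obtain ⟨h1, h2⟩ := h
  exact ⟨fun hin => h1 (hin.trans (List.drop_suffix k d).isInfix),
         fun hin => h2 (hin.trans (List.drop_suffix k d).isInfix)⟩

lemma lemMI (n : Nat) : ∀ d : List Char, d.length ≤ n →
    (∀ acc : List Char, (∀ i, i < acc.length → ¬ chXO <+: ((acc ++ d).drop i)) → goodStr d →
      (((acc ++ (partsOf d).1) :: (partsOf d).2).filter keepPart).flatten = acc ++ xrefCore d) ∧
    (∀ pre : List Char, (∀ i, i < 5 + pre.length → ¬ chXC <+: ((chXO ++ pre ++ d).drop i)) → goodStr d →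
      (((chXO ++ pre ++ (partsOf d).1) :: (partsOf d).2).filter keepPart).flatten = xrefSeg d pre) := by
  induction n with
  | zero =>
    intro d hd
    have : d = [] := by cases d <;> simp_all
    subst this
    constructor
    · intro acc hAcc _
      rw [partsOf_nil, core_nil]
      have hkacc : keepPart acc = true := by
        have hXOf : PySem.Chars.isIn chXO acc = false :=
          isIn_false_of_no_start chXO acc (acc ++ []) (by simp) (List.prefix_append _ _) hAcc
        simp only [keepPart, hXOf, Bool.false_and, Bool.not_false]
      simp only [List.append_nil]
      rw [List.filter_cons, if_pos hkacc]
      simp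
    · intro pre hPre _
      rw [partsOf_nil, seg_nil]
      have hkeep : keepPart (chXO ++ pre) = true := by
        have hXCf : PySem.Chars.isIn chXC (chXO ++ pre) = false := by
          apply isIn_false_of_no_start chXC (chXO ++ pre) (chXO ++ pre ++ ([] : List Char)) (by simp)
            (by simp)
          intro i hi
          exact hPre i (by simp at hi ⊢; omega)
        simp only [keepPart, hXCf, Bool.and_false, Bool.not_false]
      simp only [List.append_nil]
      rw [List.filter_cons, if_pos hkeep]
      simp
  | succ m ih =>
    intro d hd
    constructor
    · -- main mode
      intro acc hAcc hG
      by_cases hxo : chXO <+: d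
      · obtain ⟨r, rfl⟩ := hxo
        rw [partsOf_xo]
        have hkacc : keepPart acc = true := by
          have hXOf : PySem.Chars.isIn chXO acc = false :=
            isIn_false_of_no_start chXO acc (acc ++ (chXO ++ r)) (by simp) (List.prefix_append _ _) hAcc
          simp only [keepPart, hXOf, Bool.false_and, Bool.not_false]
        have hI := (ih r (by simp at hd; omega)).2 [] (fun i hi => by
            simpa using noXC_in_XO r i (by simpa using hi)) (by
            have := goodStr_drop (chXO ++ r) 5 hG; simpa using this)
        simp only [List.append_nil] at hI ⊢
        rw [core_xo, List.filter_cons, if_pos hkacc, List.flatten_cons, hI]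
      · by_cases hxc : chXC <+: d
        · obtain ⟨r, rfl⟩ := hxc
          rw [partsOf_xc]
          have hkeep : keepPart (acc ++ chXC) = true := by
            have hXOf : PySem.Chars.isIn chXO (acc ++ chXC) = false := by
              apply isIn_false_of_no_start chXO (acc ++ chXC) (acc ++ (chXC ++ r)) (by simp)
                ⟨r, by simp⟩
              intro i hi
              by_cases hlt : i < acc.length
              · exact hAcc i hlt
              · rw [drop_between _ _ _ (by omega)]
                exact noXO_in_XC r (i - acc.length) (by simp at hi; omega)
            simp only [keepPart, hXOf, Bool.false_and, Bool.not_false]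
          have hM := (ih r (by simp at hd; omega)).1 [] (by simp)
            (goodStr_drop (chXC ++ r) 7 (by simpa using hG))
          simp only [List.nil_append] at hM
          rw [core_walk chXC r (fun i hi => noXO_in_XC r i (by simpa using hi))]
          rw [List.filter_cons, if_pos hkeep, List.flatten_cons, hM]
          simp
        · cases d with
          | nil =>
            rw [partsOf_nil, core_nil]
            have hkacc : keepPart acc = true := by
              have hXOf : PySem.Chars.isIn chXO acc = false :=
                isIn_false_of_no_start chXO acc (acc ++ []) (by simp) (List.prefix_append _ _) hAcc
              simp only [keepPart, hXOf, Bool.false_and, Bool.not_false]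
            simp only [List.append_nil]
            rw [List.filter_cons, if_pos hkacc]
            simp
          | cons c t =>
            rw [partsOf_char c t hxo hxc hG, core_char c t hxo]
            have hM := (ih t (by simp at hd; omega)).1 (acc ++ [c]) (fun i hi => by
                rw [show (acc ++ [c]) ++ t = acc ++ (c :: t) from by simp]
                by_cases hlt : i < acc.length
                · exact hAcc i hlt
                · have : i = acc.length := by simp at hi; omega
                  subst this
                  rw [List.drop_left]
                  exact hxo) (goodStr_drop (c :: t) 1 hG)
            rw [show acc ++ c :: (partsOf t).1 = (acc ++ [c]) ++ (partsOf t).1 from by simp, hM]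
            simp
    · -- inside an open '<xref'
      intro pre hPre hG
      by_cases hxc : chXC <+: d
      · obtain ⟨r, rfl⟩ := hxc
        rw [partsOf_xc, seg_xc]
        have hdropped : keepPart (chXO ++ pre ++ chXC) = false := by
          have h1 : PySem.Chars.isIn chXO (chXO ++ pre ++ chXC) = true := by
            apply isIn_of_infix
            exact ((List.prefix_append chXO pre).trans (List.prefix_append _ _)).isInfix
          have h2 : PySem.Chars.isIn chXC (chXO ++ pre ++ chXC) = true :=
            isIn_of_infix _ _ (List.suffix_append _ _).isInfix
          simp only [keepPart, h1, h2, Bool.and_self, Bool.not_true]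
        have hM := (ih r (by simp at hd; omega)).1 [] (by simp)
          (goodStr_drop (chXC ++ r) 7 (by simpa using hG))
        simp only [List.nil_append] at hM
        rw [List.filter_cons, if_neg (by rw [hdropped]; simp), hM]
      · by_cases hxo : chXO <+: d
        · obtain ⟨r, rfl⟩ := hxo
          rw [partsOf_xo, seg_xo]
          have hkeep : keepPart (chXO ++ pre) = true := by
            have hXCf : PySem.Chars.isIn chXC (chXO ++ pre) = false := by
              apply isIn_false_of_no_start chXC (chXO ++ pre) (chXO ++ pre ++ (chXO ++ r)) (by simp)
                ⟨chXO ++ r, by simp⟩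
              intro i hi
              exact hPre i (by simp at hi ⊢; omega)
            simp only [keepPart, hXCf, Bool.and_false, Bool.not_false]
          have hI := (ih r (by simp at hd; omega)).2 [] (fun i hi => by
              simpa using noXC_in_XO r i (by simpa using hi)) (by
              have := goodStr_drop (chXO ++ r) 5 hG; simpa using this)
          simp only [List.append_nil] at hI ⊢
          rw [List.filter_cons, if_pos hkeep, List.flatten_cons, hI]
        · cases d with
          | nil =>
            rw [partsOf_nil, seg_nil]
            have hkeep : keepPart (chXO ++ pre) = true := by
              have hXCf : PySem.Chars.isIn chXC (chXO ++ pre) = false := by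
                apply isIn_false_of_no_start chXC (chXO ++ pre) (chXO ++ pre ++ ([] : List Char)) (by simp)
                  (by simp)
                intro i hi
                exact hPre i (by simp at hi ⊢; omega)
              simp only [keepPart, hXCf, Bool.and_false, Bool.not_false]
            simp only [List.append_nil]
            rw [List.filter_cons, if_pos hkeep]
            simp
          | cons c t =>
            rw [partsOf_char c t hxo hxc hG, seg_char c t pre hxc hxo]
            have hI := (ih t (by simp at hd; omega)).2 (pre ++ [c]) (fun i hi => by
                rw [show chXO ++ (pre ++ [c]) ++ t = chXO ++ pre ++ (c :: t) from by simp]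
                by_cases hlt : i < 5 + pre.length
                · exact hPre i hlt
                · have : i = 5 + pre.length := by simp at hi; omega
                  subst this
                  rw [show (5 : Nat) + pre.length = (chXO ++ pre).length from by
                        simp only [List.length_append, List.length_cons, List.length_nil]; try omega,
                      List.drop_left]
                  exact hxc) (goodStr_drop (c :: t) 1 hG)
            rw [show chXO ++ pre ++ (c :: (partsOf t).1) = chXO ++ (pre ++ [c]) ++ (partsOf t).1 from by simp]
            rw [hI]

lemma lemM (d acc : List Char)
    (hAcc : ∀ i, i < acc.length → ¬ chXO <+: ((acc ++ d).drop i)) (hG : goodStr d) :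
    (((acc ++ (partsOf d).1) :: (partsOf d).2).filter keepPart).flatten = acc ++ xrefCore d :=
  (lemMI d.length d le_rfl).1 acc hAcc hG


lemma foldl_branch_flip :
    (fun (acc : List (List Char)) part =>
        if PySem.Chars.isIn chXO part && PySem.Chars.isIn chXC part then acc else acc ++ [part])
      = (fun acc part => if keepPart part then acc ++ [part] else acc) := by
  funext acc part
  unfold keepPart
  cases h : (PySem.Chars.isIn chXO part && PySem.Chars.isIn chXC part) <;> simp_all

lemma stage_eq (tl : List Char) (hB : ¬ chBR <:+: tl)
    (hBX : ¬ (['_','B','R','E','A','K'] ++ chXO) <:+: tl) :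
    removeXrefCharsA tl = removeXrefCharsB tl := by
  have e1 : "_BREAK_<xref".toList = chBR ++ chXO := by decide
  have e2 : "</xref>_BREAK_".toList = chXC ++ chBR := by decide
  have e3 : "_BREAK_".toList = chBR := by decide
  have hjoin : PySem.Chars.join []
      ((PySem.Chars.splitOn
          (PySem.Chars.replace (PySem.Chars.replace tl "<xref".toList "_BREAK_<xref".toList)
            "</xref>".toList "</xref>_BREAK_".toList) "_BREAK_".toList).foldl
        (fun acc part =>
          if PySem.Chars.isIn "<xref".toList part && PySem.Chars.isIn "</xref>".toList part then acc
          else acc ++ [part]) []) = xrefCore tl := by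
    rw [toList_xo, toList_xc, e1, e2, e3,
        replace_eq _ _ _ (by simp), replace_eq _ _ _ (by simp),
        show repS chXC (chXC ++ chBR) (repS chXO (chBR ++ chXO) tl) = pipe tl from rfl,
        splitOn_eq _ _ (by simp),
        show splS chBR (pipe tl) = partsOf tl from rfl,
        foldl_branch_flip, PySem.List.foldl_append_if_eq_filter, join_nil_flatten]
    have := lemM tl [] (by simp) ⟨hB, hBX⟩
    simpa using this
  simp only [removeXrefCharsA, removeXrefCharsB]
  rw [hjoin]

-- ===== VERDICT (by name: the statement is the Claim_ definition above) =====
theorem remove_xref_spec : Claim_unchanged_remove_xref := by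
  intro x hDom hnD
  cases x with
  | none => rfl
  | some s =>
    unfold D_remove_xref at hnD
    simp only [Option.map_some, Option.getD_some, Bool.or_eq_true, not_or, Bool.not_eq_true] at hnD
    obtain ⟨h1, h2⟩ := hnD
    have hB : ¬ chBR <:+: s.toList := by
      intro hin
      have := (PySem.Str.isIn_iff_infix (sub := "_BREAK_") (s := s)).mpr (by
        rwa [show "_BREAK_".toList = chBR from by decide])
      rw [h1] at this
      exact Bool.false_ne_true this
    have hBX : ¬ (['_','B','R','E','A','K'] ++ chXO) <:+: s.toList := by
      intro hin
      have := (PySem.Str.isIn_iff_infix (sub := "_BREAK<xref") (s := s)).mpr (by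
        rwa [show "_BREAK<xref".toList = ['_','B','R','E','A','K'] ++ chXO from by decide])
      rw [h2] at this
      exact Bool.false_ne_true this
    show some (String.ofList (removeXrefCharsA s.toList)) = some (String.ofList (removeXrefCharsB s.toList))
    rw [stage_eq s.toList hB hBX]

theorem remove_xref_changed : Claim_changed_remove_xref := by
  unfold Claim_changed_remove_xref
  refine ⟨by decide, by decide, by decide, ?_, by decide⟩
  have hl : "_BREAK_".toList = ['_','B','R','E','A','K','_'] := by decide
  have h : xrefCore ['_','B','R','E','A','K','_'] = ['_','B','R','E','A','K','_'] := by
    simp [xrefCore]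
  show remove_xref_alt (some "_BREAK_") = some "_BREAK_"
  simp only [remove_xref_alt, removeXrefCharsB, hl, h]
  decide
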